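-- pv_equiv track=rewrite | github.com/tnnrhpwd/MX5-Telemetry | tools/LED_Simulator/led_simulator_v2.1.py | get_state_0_pattern
-- ===== SOURCE A (Python) =====
-- LED_COUNT = 30  # Fixed hardware constant
--
-- def get_state_0_pattern(pepper_position):
--     """
--     State 0: Idle/Neutral - White pepper inward from edges.
--     Returns list of RGB tuples for all LEDs.
--     """
--     pattern = []
--     # Use maximum brightness for debugging - ensure LEDs are visible!
--     bright_white = (255, 255, 255)  # Full brightness white
--
--     for i in range(LED_COUNT):
--         # Calculate distance from nearest edge (0 for edge LEDs, increases toward center)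
--         if i < LED_COUNT // 2:
--             distance_from_edge = i  # Left side: 0, 1, 2, ...
--         else:
--             distance_from_edge = LED_COUNT - 1 - i  # Right side: ..., 2, 1, 0
--
--         # Light up LEDs from edge inward up to pepper_position
--         # Cap at half the strip (center point) - during hold time, keep all lit
--         max_position = LED_COUNT // 2 - 1  # 14 for 30 LEDs (reaches center)
--
--         if pepper_position <= max_position:
--             # Animation in progress - light up based on distance
--             if distance_from_edge <= pepper_position:
--                 pattern.append(bright_white)
--             else:
--                 pattern.append((0, 0, 0))
--         else:
--             # Hold time - keep entire strip lit
--             pattern.append(bright_white)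
--
--     return pattern
-- ===== SOURCE B (Python) =====
-- LED_COUNT = 30  # Fixed hardware constant
--
-- def get_state_0_pattern(pepper_position):
--     """State 0: Idle/Neutral - white lit inward from the edges (direct fill)."""
--     bright_white = (255, 255, 255)
--     if pepper_position > LED_COUNT // 2 - 1:
--         return [bright_white] * LED_COUNT
--     n = max(pepper_position + 1, 0)
--     pattern = [(0, 0, 0)] * LED_COUNT
--     pattern[:n] = [bright_white] * n
--     pattern[LED_COUNT - n:] = [bright_white] * n
--     return pattern
-- ===== Notes on version B (the rewrite author's own statement) =====
-- stated objective: simpler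
-- what changed: Replaces the per-LED distance-from-edge classification loop with direct construction: all-white past the half point, otherwise a zero-initialised strip whose first and last n slots (n = the lit count, clamped at zero) are slice-assigned white.
import Mathlib
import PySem

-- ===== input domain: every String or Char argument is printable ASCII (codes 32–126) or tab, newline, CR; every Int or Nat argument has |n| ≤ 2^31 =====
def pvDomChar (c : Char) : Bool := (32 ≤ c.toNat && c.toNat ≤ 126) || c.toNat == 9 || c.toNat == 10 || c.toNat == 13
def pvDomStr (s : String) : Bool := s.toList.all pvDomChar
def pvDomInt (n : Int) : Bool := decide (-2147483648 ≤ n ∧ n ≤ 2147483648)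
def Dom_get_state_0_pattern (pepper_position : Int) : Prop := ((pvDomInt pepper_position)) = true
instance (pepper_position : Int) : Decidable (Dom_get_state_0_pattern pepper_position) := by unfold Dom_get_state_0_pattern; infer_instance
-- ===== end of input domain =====

-- B replaces A's per-LED distance-from-edge classification loop with a direct fill of the
-- first n and last n slots of a zero-initialised strip (objective: simpler).

-- ===== PORT A =====
-- literal transliteration of A: fold over range(LED_COUNT), classifying each LED by its
-- distance from the nearest edge.
def get_state_0_pattern (pepper_position : Int) : List (Int × Int × Int) :=
  let bright_white : Int × Int × Int := (255, 255, 255)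
  (PySem.List.pyRange 0 30 1).foldl
    (fun pattern i =>
      let distance_from_edge : Int :=
        if i < PySem.Int.floordiv 30 2 then i else 30 - 1 - i
      let max_position : Int := PySem.Int.floordiv 30 2 - 1
      if pepper_position ≤ max_position then
        if distance_from_edge ≤ pepper_position then pattern ++ [bright_white]
        else pattern ++ [(0, 0, 0)]
      else pattern ++ [bright_white])
    []

-- ===== PORT B =====
-- literal transliteration of Source B: all-white past the half point; otherwise slice-assign
-- the first n and last n elements of a black strip (rendered as replicate-concatenation).
def get_state_0_pattern_alt (pepper_position : Int) : List (Int × Int × Int) :=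
  let bright_white : Int × Int × Int := (255, 255, 255)
  if pepper_position > PySem.Int.floordiv 30 2 - 1 then
    List.replicate 30 bright_white
  else
    let n : Int := max (pepper_position + 1) 0
    List.replicate n.toNat bright_white ++
      List.replicate (30 - 2 * n).toNat (0, 0, 0) ++
      List.replicate n.toNat bright_white

-- ===== PRECONDITION & SPEC =====
def Spec_get_state_0_pattern (pepper_position : Int) (out : List (Int × Int × Int)) : Prop := out = get_state_0_pattern_alt pepper_position
instance (pepper_position : Int) (out : List (Int × Int × Int)) : Decidable (Spec_get_state_0_pattern pepper_position out) := by unfold Spec_get_state_0_pattern; infer_instance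

-- ===== CLAIM (what is proved, stated in full; the proofs are below) =====
def Claim_equal_get_state_0_pattern : Prop := ∀ (pepper_position : Int), Dom_get_state_0_pattern pepper_position → Spec_get_state_0_pattern pepper_position (get_state_0_pattern pepper_position)

-- ===== LEMMAS AND PROOFS =====

-- the per-LED value A appends at index i (proof helper)
def fA (p : Int) (i : Int) : Int × Int × Int :=
  if p ≤ PySem.Int.floordiv 30 2 - 1 then
    if (if i < PySem.Int.floordiv 30 2 then i else 30 - 1 - i) ≤ p then (255, 255, 255)
    else (0, 0, 0)
  else (255, 255, 255)

theorem pyRangeLit : PySem.List.pyRange 0 30 1 = [0,1,2,3,4,5,6,7,8,9,10,11,12,13,14,15,16,17,18,19,20,21,22,23,24,25,26,27,28,29] := by decide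

theorem fdLit : PySem.Int.floordiv 30 2 = 15 := by decide

-- A's loop appends one element per index: it is the map of fA over the range.
theorem A_fold (p : Int) (l : List Int) (acc : List (Int × Int × Int)) :
    l.foldl (fun pattern i =>
      if p ≤ PySem.Int.floordiv 30 2 - 1 then
        if (if i < PySem.Int.floordiv 30 2 then i else 30 - 1 - i) ≤ p then pattern ++ [(255, 255, 255)]
        else pattern ++ [(0, 0, 0)]
      else pattern ++ [(255, 255, 255)]) acc = acc ++ l.map (fA p) := by
  induction l generalizing acc with
  | nil => simp
  | cons x xs ih =>
    simp only [List.foldl, List.map]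
    rw [ih]
    simp only [fA]
    split_ifs <;> simp

theorem A_eq_map (p : Int) :
    get_state_0_pattern p = (PySem.List.pyRange 0 30 1).map (fA p) := by
  unfold get_state_0_pattern
  dsimp only
  rw [A_fold]
  simp

-- Both programs return all-white once pepper_position passes the half point.
theorem eq_of_gt (p : Int) (h : 14 < p) :
    get_state_0_pattern p = get_state_0_pattern_alt p := by
  rw [A_eq_map, pyRangeLit]
  simp only [fA, fdLit, get_state_0_pattern_alt, if_neg (by omega : ¬ p ≤ 15 - 1),
    if_pos (by omega : p > 15 - 1), List.map]
  decide

-- With a negative position both programs light nothing.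
theorem eq_of_neg (p : Int) (h : p < 0) :
    get_state_0_pattern p = get_state_0_pattern_alt p := by
  have hn : max (p + 1) 0 = 0 := by omega
  rw [A_eq_map, pyRangeLit]
  simp only [fA, fdLit, get_state_0_pattern_alt, hn,
    if_pos (by omega : p ≤ 15 - 1), if_neg (by omega : ¬ p > 15 - 1), List.map]
  norm_num
  simp only [eq_false (by omega : ¬((0:Int) ≤ p)), eq_false (by omega : ¬((1:Int) ≤ p)), eq_false (by omega : ¬((2:Int) ≤ p)), eq_false (by omega : ¬((3:Int) ≤ p)), eq_false (by omega : ¬((4:Int) ≤ p)), eq_false (by omega : ¬((5:Int) ≤ p)), eq_false (by omega : ¬((6:Int) ≤ p)), eq_false (by omega : ¬((7:Int) ≤ p)), eq_false (by omega : ¬((8:Int) ≤ p)), eq_false (by omega : ¬((9:Int) ≤ p)), eq_false (by omega : ¬((10:Int) ≤ p)), eq_false (by omega : ¬((11:Int) ≤ p)), eq_false (by omega : ¬((12:Int) ≤ p)), eq_false (by omega : ¬((13:Int) ≤ p)), eq_false (by omega : ¬((14:Int) ≤ p)), if_false]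
  decide

-- ===== VERDICT (by name: the statement is the Claim_ definition above) =====
theorem get_state_0_pattern_spec : Claim_equal_get_state_0_pattern := by
  intro p _
  unfold Spec_get_state_0_pattern
  rcases lt_or_ge 14 p with h | h
  · exact eq_of_gt p h
  rcases lt_or_ge p 0 with h0 | h0
  · exact eq_of_neg p h0
  · interval_cases p <;> decide
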